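-- pv_equiv track=rewrite | github.com/mkkycia/LOGIA_stage2_year16 | slowa_bartka.py | czy_jest_slowem_bartka
-- ===== SOURCE A (Python) =====
-- def czy_jest_slowem_bartka(slowo):
--     zapas = 0
--     for litera in slowo:
--         if 'a' == litera:
--             zapas+=1
--         elif 'b' == litera:
--             zapas-=1
--         if zapas<0:
--             return False
--         elif zapas>1:
--             return False
--     if 'a' in slowo and 'b' in slowo:
--         if zapas == 0:
--             return True
--         else:
--             return False
--     else:
--         if zapas == 0 or zapas == 1:
--             return True
--         else:
--             return False
-- ===== SOURCE B (Python) =====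
-- def czy_jest_slowem_bartka(slowo):
--     # Pattern view: keep only the 'a'/'b' letters; the word is valid exactly when
--     # that core is '', 'a', or a whole number of 'ab' blocks.
--     core = ''.join(c for c in slowo if c in 'ab')
--     if core in ('', 'a'):
--         return True
--     return len(core) % 2 == 0 and core == 'ab' * (len(core) // 2)
-- ===== Notes on version B (the rewrite author's own statement) =====
-- stated objective: simpler
-- what changed: Replaces the stateful balance scan with early returns and the final two-way case split by a direct pattern characterization: filter the word to its 'a'/'b' core and test whether it is '', 'a', or a repetition of 'ab' blocks.
import Mathlib
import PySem

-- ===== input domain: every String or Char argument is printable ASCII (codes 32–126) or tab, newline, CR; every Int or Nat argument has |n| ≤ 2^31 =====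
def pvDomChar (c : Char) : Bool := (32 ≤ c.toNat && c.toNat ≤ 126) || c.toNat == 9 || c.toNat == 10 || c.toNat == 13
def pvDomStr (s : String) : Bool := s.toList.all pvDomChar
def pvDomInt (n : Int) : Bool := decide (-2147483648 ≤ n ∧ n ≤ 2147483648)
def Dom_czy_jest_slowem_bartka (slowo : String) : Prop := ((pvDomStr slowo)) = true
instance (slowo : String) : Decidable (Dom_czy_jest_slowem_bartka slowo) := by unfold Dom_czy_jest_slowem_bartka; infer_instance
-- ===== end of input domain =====

-- B replaces A's balance scan with a pattern test on the word's 'a'/'b' core ('', 'a', or repeated 'ab' blocks); objective: simpler.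


-- ===== PORT A =====
-- the for-loop of A with its early 'return False' exits: none = early return False
def pvLoopA : List Char → Int → Option Int
  | [], zapas => some zapas
  | litera :: rest, zapas =>
    let zapas' := if litera = 'a' then zapas + 1
                  else if litera = 'b' then zapas - 1
                  else zapas
    if zapas' < 0 then none
    else if zapas' > 1 then none
    else pvLoopA rest zapas'

def czy_jest_slowem_bartka (slowo : String) : Bool :=
  match pvLoopA slowo.toList 0 with
  | none => false
  | some zapas =>
    if slowo.toList.contains 'a' && slowo.toList.contains 'b' then
      zapas == 0
    else
      zapas == 0 || zapas == 1

-- ===== PORT B =====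
-- 'ab' * k of Source B
def pvAbBlock (k : Nat) : List Char := (List.replicate k ['a', 'b']).flatten

def czy_jest_slowem_bartka_alt (slowo : String) : Bool :=
  let core := slowo.toList.filter (fun c => c == 'a' || c == 'b')
  if core = [] ∨ core = ['a'] then true
  else decide (core.length % 2 = 0) && decide (core = pvAbBlock (core.length / 2))

-- ===== PRECONDITION & SPEC =====
def Spec_czy_jest_slowem_bartka (slowo : String) (out : Bool) : Prop := out = czy_jest_slowem_bartka_alt slowo
instance (slowo : String) (out : Bool) : Decidable (Spec_czy_jest_slowem_bartka slowo out) := by unfold Spec_czy_jest_slowem_bartka; infer_instance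

-- ===== CLAIM (what is proved, stated in full; the proofs are below) =====
def Claim_equal_czy_jest_slowem_bartka : Prop := ∀ (slowo : String), Dom_czy_jest_slowem_bartka slowo → Spec_czy_jest_slowem_bartka slowo (czy_jest_slowem_bartka slowo)

-- ===== LEMMAS AND PROOFS =====

-- state machine view of A's loop restricted to zapas ∈ {0,1}: false ~ zapas = 0, true ~ zapas = 1
def pvAlt : Bool → List Char → Bool
  | _, [] => true
  | false, c :: r => c == 'a' && pvAlt true r
  | true, c :: r => c == 'b' && pvAlt false r

def pvStateInt (s : Bool) : Int := if s then 1 else 0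

theorem pvLoopA_char (l : List Char) :
    ∀ s : Bool,
      pvLoopA l (pvStateInt s) =
        (if pvAlt s (l.filter (fun c => c == 'a' || c == 'b')) then
          some ((pvStateInt s + (l.filter (fun c => c == 'a' || c == 'b')).length) % 2)
        else none) := by
  induction l with
  | nil =>
      intro s; cases s <;> simp [pvLoopA, pvAlt, pvStateInt]
  | cons c rest ih =>
      intro s
      by_cases ha : c = 'a'
      · subst ha
        cases s
        · have := ih true
          simp [pvLoopA, pvAlt, pvStateInt] at this ⊢
          rw [this]
          split <;> simp <;> omega
        · simp [pvLoopA, pvAlt, pvStateInt]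
      · by_cases hb : c = 'b'
        · subst hb
          cases s
          · simp [pvLoopA, pvAlt, pvStateInt, ha]
          · have := ih false
            simp [pvLoopA, pvAlt, pvStateInt] at this ⊢
            rw [this]
            split <;> simp <;> omega
        · cases s <;>
          · have h1 := ih false
            have h2 := ih true
            simp [pvLoopA, pvStateInt, beq_iff_eq, ha, hb] at h1 h2 ⊢
            first
              | exact h1
              | exact h2

theorem pvAlt_abBlock (k : Nat) : pvAlt false (pvAbBlock k) = true := by
  induction k with
  | zero => simp [pvAbBlock, pvAlt]
  | succ n ih => simpa [pvAbBlock, List.replicate_succ, pvAlt] using ih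

theorem pvAlt_even_eq : ∀ n (l : List Char), l.length ≤ n → pvAlt false l = true →
    l.length % 2 = 0 → l = pvAbBlock (l.length / 2) := by
  intro n
  induction n with
  | zero =>
      intro l hl _ _
      have : l = [] := List.eq_nil_of_length_eq_zero (Nat.le_zero.mp hl)
      simp [this, pvAbBlock]
  | succ n ih =>
      intro l hl halt hev
      match l with
      | [] => simp [pvAbBlock]
      | [c] => simp at hev
      | c :: d :: r =>
          simp [pvAlt] at halt
          obtain ⟨hc, hd, hr⟩ := halt
          subst hc; subst hd
          simp at hl
          have hev' : r.length % 2 = 0 := by simp at hev; omega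
          have := ih r (by omega) hr hev'
          have hlen : ('a' :: 'b' :: r).length / 2 = r.length / 2 + 1 := by
            simp; omega
          rw [hlen]
          simp [pvAbBlock, List.replicate_succ]
          exact this

theorem czy_jest_slowem_bartka_eq (slowo : String) :
    czy_jest_slowem_bartka slowo = czy_jest_slowem_bartka_alt slowo := by
  unfold czy_jest_slowem_bartka czy_jest_slowem_bartka_alt
  have hloop := pvLoopA_char slowo.toList false
  simp only [pvStateInt, Bool.false_eq_true, if_false, Int.zero_add] at hloop
  set core := slowo.toList.filter (fun c => c == 'a' || c == 'b') with hcore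
  have hmema : slowo.toList.contains 'a' = core.contains 'a' := by
    simp [hcore, List.contains_eq_mem, List.mem_filter]
  have hmemb : slowo.toList.contains 'b' = core.contains 'b' := by
    simp [hcore, List.contains_eq_mem, List.mem_filter]
  rw [hloop, hmema, hmemb]
  by_cases halt : pvAlt false core = true
  · rw [if_pos halt]
    by_cases hev : core.length % 2 = 0
    · -- final zapas is 0: A is true in both branches; B's pattern check succeeds
      have hpat : core = pvAbBlock (core.length / 2) :=
        pvAlt_even_eq core.length core le_rfl halt hev
      have hz0 : ((core.length : Int) % 2) = 0 := by omega
      simp [hz0, hev]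
      exact Or.inr hpat
    · -- final zapas is 1: core = 'a' :: r with pvAlt true r
      have hz : ((core.length : Int) % 2) = 1 := by omega
      match hc : core with
      | [] => simp at hev
      | ['a'] => simp
      | c :: d :: r =>
          simp [pvAlt] at halt
          obtain ⟨h1, h2, _⟩ := halt
          subst h1; subst h2
          have hne : ¬('a' :: 'b' :: r = [] ∨ 'a' :: 'b' :: r = ['a']) := by simp
          rw [if_neg hne]
          simp only [List.length_cons] at hev
          have h1 : ¬((r.length : Int) + 1 + 1) % 2 = 0 := by omega
          have h2 : ¬(r.length + 1 + 1) % 2 = 0 := by omega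
          simp [h1, h2]
      | [c] =>
          simp [pvAlt] at halt
          subst halt
          simp
  · rw [if_neg halt]
    have hne : ¬(core = [] ∨ core = ['a']) := by
      rintro (h | h) <;> rw [h] at halt <;> simp [pvAlt] at halt
    rw [if_neg hne]
    have hnp : ¬(core = pvAbBlock (core.length / 2)) := by
      intro h
      exact halt (h ▸ pvAlt_abBlock (core.length / 2))
    simp [hnp]

-- ===== VERDICT (by name: the statement is the Claim_ definition above) =====
theorem czy_jest_slowem_bartka_spec : Claim_equal_czy_jest_slowem_bartka := by
  intro slowo _
  unfold Spec_czy_jest_slowem_bartka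
  exact czy_jest_slowem_bartka_eq slowo
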